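-- pv_equiv track=rewrite | github.com/bhupendpatil/Practice | Python/CheckiO/Elementary/The end of other.py | checkio
-- ===== SOURCE A (Python) =====
-- def checkio(words_set):
--     b = words_set
--     c = []
--     for i in words_set:
--         for t in b:
--             if t.endswith(i):
--                 c.append(t)
--     if len(c)>len(words_set):
--         return True
--     else:
--         return False
-- ===== SOURCE B (Python) =====
-- def checkio(words_set):
--     words = set(words_set)
--     if len(words) < len(words_set):
--         return True
--     return any(w[i:] in words for w in words for i in range(1, len(w) + 1))
-- ===== Notes on version B (the rewrite author's own statement) =====
-- stated objective: faster
-- what changed: A scans all word pairs with endswith and counts matches; B builds a set of the words once, returns True on any duplicate, and otherwise looks up each word's proper suffixes in the set.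
import Mathlib
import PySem

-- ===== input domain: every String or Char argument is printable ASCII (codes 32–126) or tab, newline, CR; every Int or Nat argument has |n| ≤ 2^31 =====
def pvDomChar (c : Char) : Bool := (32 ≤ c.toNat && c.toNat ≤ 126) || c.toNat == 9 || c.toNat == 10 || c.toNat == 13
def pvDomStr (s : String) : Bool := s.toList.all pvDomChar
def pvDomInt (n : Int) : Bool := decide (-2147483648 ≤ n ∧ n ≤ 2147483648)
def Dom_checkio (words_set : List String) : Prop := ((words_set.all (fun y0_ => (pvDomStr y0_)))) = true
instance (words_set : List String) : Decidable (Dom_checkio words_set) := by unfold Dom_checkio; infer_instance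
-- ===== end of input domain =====

-- B replaces A's all-pairs endswith scan by a set of the words plus proper-suffix membership lookups (different algorithm; same return value).

-- ===== PORT A =====
def checkio (words_set : List String) : Bool :=
  let b := words_set
  let c : List String := words_set.foldl (fun c i =>
    b.foldl (fun c t => if PySem.Str.endswith t i then c ++ [t] else c) c) []
  if c.length > words_set.length then true else false

-- ===== PORT B =====
def checkio_alt (words_set : List String) : Bool :=
  let words : PySem.Set String := PySem.Set.ofList words_set
  if PySem.Set.len words < (words_set.length : Int) then true
  else words.any (fun w =>
    (PySem.List.pyRange 1 (PySem.Str.len w + 1)).any (fun i =>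
      PySem.Set.contains words (PySem.Str.slice w (some i) none)))

-- ===== PRECONDITION & SPEC =====
def Spec_checkio (words_set : List String) (out : Bool) : Prop := out = checkio_alt words_set
instance (words_set : List String) (out : Bool) : Decidable (Spec_checkio words_set out) := by unfold Spec_checkio; infer_instance

-- ===== CLAIM (what is proved, stated in full; the proofs are below) =====
def Claim_equal_checkio : Prop := ∀ (words_set : List String), Dom_checkio words_set → Spec_checkio words_set (checkio words_set)

-- ===== LEMMAS AND PROOFS =====

-- Both programs decide this property: the list has a duplicated word, or some word is a strict suffix of another word of the list.
def HasPair (l : List String) : Prop :=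
  ¬ l.Nodup ∨ ∃ t ∈ l, ∃ s ∈ l, s ≠ t ∧ s.toList <:+ t.toList

lemma ends_iff (t i : String) : PySem.Str.endswith t i = true ↔ i.toList <:+ t.toList := by
  rw [PySem.Str.endswith_eq, PySem.Chars.endswith_iff]

lemma length_le_sum_map {α : Type} (f : α → Nat) :
    ∀ (l : List α), (∀ x ∈ l, 1 ≤ f x) → l.length ≤ (l.map f).sum := by
  intro l
  induction l with
  | nil => simp
  | cons a l ih =>
    intro h
    have h1 := h a (by simp)
    have h2 := ih (fun x hx => h x (by simp [hx]))
    simp only [List.map_cons, List.sum_cons, List.length_cons]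
    omega

lemma sum_map_gt_length {α : Type} (f : α → Nat) :
    ∀ (l : List α), (∀ x ∈ l, 1 ≤ f x) →
      (l.length < (l.map f).sum ↔ ∃ x ∈ l, 2 ≤ f x) := by
  intro l
  induction l with
  | nil => simp
  | cons a l ih =>
    intro h
    have h1 := h a (by simp)
    have htail : ∀ x ∈ l, 1 ≤ f x := fun x hx => h x (by simp [hx])
    have h2 := length_le_sum_map f l htail
    have h3 := ih htail
    simp only [List.map_cons, List.sum_cons, List.length_cons, List.mem_cons]
    constructor
    · intro hlt
      by_cases ha : 2 ≤ f a
      · exact ⟨a, Or.inl rfl, ha⟩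
      · obtain ⟨x, hx, h2x⟩ := h3.mp (by omega)
        exact ⟨x, Or.inr hx, h2x⟩
    · rintro ⟨x, hx | hx, h2x⟩
      · subst hx; omega
      · have := h3.mpr ⟨x, hx, h2x⟩; omega

lemma two_le_length_of_two_mem {α : Type} {l : List α} {x y : α}
    (hx : x ∈ l) (hy : y ∈ l) (hne : x ≠ y) : 2 ≤ l.length := by
  obtain ⟨l1, l2, rfl⟩ := List.append_of_mem hx
  rcases List.mem_append.mp hy with h | h
  · have := List.length_pos_of_mem h
    simp only [List.length_append, List.length_cons]
    omega
  · rcases List.mem_cons.mp h with h | h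
    · exact absurd h.symm hne
    · have := List.length_pos_of_mem h
      simp only [List.length_append, List.length_cons]
      omega

lemma exists_two_iff (l : List String) :
    (∃ i ∈ l, 2 ≤ (l.filter (fun t => PySem.Str.endswith t i)).length) ↔ HasPair l := by
  constructor
  · rintro ⟨i, hi, h2⟩
    by_cases hnd : l.Nodup
    · right
      have hfn : (l.filter (fun t => PySem.Str.endswith t i)).Nodup := hnd.filter _
      by_cases hall : ∀ t ∈ l.filter (fun t => PySem.Str.endswith t i), t = i
      · have hc : List.count i (l.filter (fun t => PySem.Str.endswith t i))
            = (l.filter (fun t => PySem.Str.endswith t i)).length :=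
          List.count_eq_length.mpr (fun b hb => (hall b hb).symm)
        have := (List.nodup_iff_count_le_one.mp hfn) i
        omega
      · push Not at hall
        obtain ⟨t, htf, hne⟩ := hall
        obtain ⟨htl, hts⟩ := List.mem_filter.mp htf
        exact ⟨t, htl, i, hi, hne.symm, (ends_iff t i).mp hts⟩
    · exact Or.inl hnd
  · rintro (hnd | ⟨t, ht, s, hs, hne, hsuf⟩)
    · rw [List.nodup_iff_count_le_one] at hnd
      push Not at hnd
      obtain ⟨a, ha⟩ := hnd
      have hal : a ∈ l := List.count_pos_iff.mp (by omega)
      refine ⟨a, hal, ?_⟩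
      calc 2 ≤ List.count a l := by omega
        _ = List.countP (fun x => x == a) l := List.count_eq_countP
        _ ≤ List.countP (fun t => PySem.Str.endswith t a) l :=
            List.countP_mono_left (fun x hx hbeq => by
              have hxa : x = a := by simpa using hbeq
              subst hxa
              exact (ends_iff x x).mpr (List.suffix_refl _))
        _ = (l.filter (fun t => PySem.Str.endswith t a)).length := List.countP_eq_length_filter
    · refine ⟨s, hs, two_le_length_of_two_mem (x := t) (y := s)
        (List.mem_filter.mpr ⟨ht, (ends_iff t s).mpr hsuf⟩)
        (List.mem_filter.mpr ⟨hs, (ends_iff s s).mpr (List.suffix_refl _)⟩)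
        hne.symm⟩

lemma checkio_iff (l : List String) : checkio l = true ↔ HasPair l := by
  have hone : ∀ i ∈ l, 1 ≤ (l.filter (fun t => PySem.Str.endswith t i)).length := by
    intro i hi
    have : i ∈ l.filter (fun t => PySem.Str.endswith t i) :=
      List.mem_filter.mpr ⟨hi, (ends_iff i i).mpr (List.suffix_refl _)⟩
    have := List.length_pos_of_mem this
    omega
  have hkey := (sum_map_gt_length (fun i => (l.filter (fun t => PySem.Str.endswith t i)).length) l hone).trans (exists_two_iff l)
  unfold checkio
  simp only [PySem.List.foldl_append_if, PySem.List.foldl_append_eq_flatMap, List.nil_append]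
  rw [List.length_flatMap]
  simp only [List.map_id']
  split_ifs with h
  · simp only [true_iff]
    exact hkey.mp (by simpa using h)
  · simp only [false_iff]
    intro hp
    exact h (by simpa using hkey.mpr hp)

-- ofList is the first-occurrence sublist of its input
lemma foldl_add_split {α : Type} [BEq α] :
    ∀ (l acc : List α), ∃ m, List.foldl PySem.Set.add acc l = acc ++ m ∧ m.Sublist l := by
  intro l
  induction l with
  | nil => exact fun acc => ⟨[], by simp, by simp⟩
  | cons x xs ih =>
    intro acc
    simp only [List.foldl_cons]
    obtain ⟨m, hm, hs⟩ := ih (PySem.Set.add acc x)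
    by_cases hc : PySem.Set.contains acc x
    · refine ⟨m, ?_, hs.cons x⟩
      have hax : PySem.Set.add acc x = acc := by rw [PySem.Set.add, if_pos hc]
      rw [hm, hax]
    · refine ⟨x :: m, ?_, hs.cons₂ x⟩
      have hax : PySem.Set.add acc x = acc ++ [x] := by rw [PySem.Set.add, if_neg hc]
      rw [hm, hax]
      simp

lemma ofList_sublist {α : Type} [BEq α] (l : List α) : (PySem.Set.ofList l).Sublist l := by
  obtain ⟨m, hm, hs⟩ := foldl_add_split l []
  rw [PySem.Set.ofList_eq_foldl, hm]
  simpa using hs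

lemma length_ofList_lt_of_not_nodup (l : List String) (h : ¬ l.Nodup) :
    (PySem.Set.ofList l).length < l.length := by
  have hs := ofList_sublist l
  have hle := hs.length_le
  rcases Nat.lt_or_ge (PySem.Set.ofList l).length l.length with hlt | hge
  · exact hlt
  · exfalso
    have heq := hs.eq_of_length (by omega)
    exact h (heq ▸ PySem.Set.nodup_ofList l)

lemma checkio_alt_iff (l : List String) : checkio_alt l = true ↔ HasPair l := by
  unfold checkio_alt
  by_cases hnd : l.Nodup
  · rw [PySem.Set.ofList_eq_self_of_nodup l hnd]
    rw [if_neg (by simp [PySem.Set.len])]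
    simp only [List.any_eq_true]
    constructor
    · rintro ⟨w, hw, i, hir, hcont⟩
      right
      obtain ⟨h1, h2⟩ := PySem.List.mem_pyRange_one.mp hir
      rw [PySem.Str.len_eq] at h2
      have hsl : (PySem.Str.slice w (some i) none).toList = w.toList.drop i.toNat := by
        rw [PySem.Str.toList_slice, PySem.Chars.slice_eq_listSlice,
          PySem.List.slice_from _ (by omega)]
      have hsm : PySem.Str.slice w (some i) none ∈ l := (PySem.Set.contains_iff _ _).mp hcont
      have hlen : (PySem.Str.slice w (some i) none).toList.length < w.toList.length := by
        rw [hsl, List.length_drop]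
        omega
      refine ⟨w, hw, _, hsm, fun he => ?_, hsl ▸ List.drop_suffix _ _⟩
      rw [he] at hlen
      omega
    · rintro (hnd' | ⟨t, ht, s, hs, hne, hsuf⟩)
      · exact absurd hnd hnd'
      have hsle := hsuf.length_le
      have hslt : s.toList.length < t.toList.length := by
        rcases Nat.lt_or_ge s.toList.length t.toList.length with h | h
        · exact h
        · exfalso
          apply hne
          apply String.ext
          rw [List.suffix_iff_eq_drop.mp hsuf]
          have : t.toList.length - s.toList.length = 0 := by omega
          rw [this, List.drop_zero]
      refine ⟨t, ht, ((t.toList.length - s.toList.length : Nat) : Int),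
        PySem.List.mem_pyRange_one.mpr ⟨by omega, by rw [PySem.Str.len_eq]; omega⟩, ?_⟩
      rw [PySem.Set.contains_iff]
      have hseq : PySem.Str.slice t (some ((t.toList.length - s.toList.length : Nat) : Int)) none = s := by
        apply String.ext
        rw [PySem.Str.toList_slice, PySem.Chars.slice_eq_listSlice,
          PySem.List.slice_from _ (by omega), Int.toNat_natCast]
        exact (List.suffix_iff_eq_drop.mp hsuf).symm
      rw [hseq]
      exact hs
  · rw [if_pos]
    · simp only [true_iff]
      exact Or.inl hnd
    · have := length_ofList_lt_of_not_nodup l hnd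
      simp only [PySem.Set.len]
      omega

-- ===== VERDICT (by name: the statement is the Claim_ definition above) =====
theorem checkio_spec : Claim_equal_checkio := by
  intro l _
  unfold Spec_checkio
  rw [Bool.eq_iff_iff, checkio_iff, checkio_alt_iff]
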